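-- pv_equiv track=rewrite | github.com/pypi-data/pypi-mirror-361 | packages/infradsl/infradsl-0.1.4-py3-none-any.whl/infradsl/core/network_intelligence.py | _prioritize_remediation
-- ===== SOURCE A (Python) =====
-- from typing import Dict, Any, List, Optional, Tuple, Union, Set
--
-- def _prioritize_remediation(violations: List[str]) -> List[Dict[str, Any]]:
--     """Prioritize remediation actions"""
--
--     priority_mapping = {
--         "encryption": {"priority": "critical", "effort": "medium"},
--         "protocol": {"priority": "high", "effort": "low"},
--         "segmentation": {"priority": "high", "effort": "high"},
--         "monitoring": {"priority": "medium", "effort": "low"},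
--         "subnet": {"priority": "medium", "effort": "medium"}
--     }
--
--     prioritized = []
--     for violation in violations:
--         priority_info = {"violation": violation, "priority": "low", "effort": "unknown"}
--
--         for key, mapping in priority_mapping.items():
--             if key in violation.lower():
--                 priority_info.update(mapping)
--                 break
--
--         prioritized.append(priority_info)
--
--     # Sort by priority: critical -> high -> medium -> low
--     priority_order = {"critical": 0, "high": 1, "medium": 2, "low": 3}
--     prioritized.sort(key=lambda x: priority_order.get(x["priority"], 4))
--
--     return prioritized
-- ===== SOURCE B (Python) =====
-- def _prioritize_remediation(violations):
--     """Prioritize remediation actions (bucket distribution instead of sorting)."""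
--     rules = [("encryption", "critical", "medium"),
--              ("protocol", "high", "low"),
--              ("segmentation", "high", "high"),
--              ("monitoring", "medium", "low"),
--              ("subnet", "medium", "medium")]
--
--     def classify(v):
--         lv = v.lower()
--         for key, pri, eff in rules:
--             if key in lv:
--                 return {"violation": v, "priority": pri, "effort": eff}
--         return {"violation": v, "priority": "low", "effort": "unknown"}
--
--     classified = [classify(v) for v in violations]
--     out = []
--     for level in ("critical", "high", "medium", "low"):
--         for d in classified:
--             if d["priority"] == level:
--                 out.append(d)
--     return out
-- ===== Notes on version B (the rewrite author's own statement) =====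
-- stated objective: alternative
-- what changed: B replaces A's comparison-based stable sort of the classified list by a bucket sweep: it iterates the four fixed priority levels in order and appends matching entries in original order, which reproduces the stable sort's output exactly.
import Mathlib
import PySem

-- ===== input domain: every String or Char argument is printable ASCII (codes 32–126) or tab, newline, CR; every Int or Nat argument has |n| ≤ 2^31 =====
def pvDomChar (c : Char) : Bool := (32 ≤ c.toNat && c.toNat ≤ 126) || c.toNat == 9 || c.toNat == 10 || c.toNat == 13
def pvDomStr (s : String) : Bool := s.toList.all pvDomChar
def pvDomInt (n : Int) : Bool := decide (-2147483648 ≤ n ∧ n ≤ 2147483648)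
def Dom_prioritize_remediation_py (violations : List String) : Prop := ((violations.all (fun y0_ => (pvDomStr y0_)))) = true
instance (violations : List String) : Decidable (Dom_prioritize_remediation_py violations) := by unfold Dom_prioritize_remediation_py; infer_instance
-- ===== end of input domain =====

-- B replaces A's final stable sort by a bucket sweep over the four fixed priority levels (same output, no sort).

-- ===== PORT A =====
-- priority_mapping, a dict of dicts, as an association list of Dicts
def pvA_priorityMapping : List (String × PySem.Dict String String) :=
  [("encryption", PySem.Dict.mk [("priority", "critical"), ("effort", "medium")]),
   ("protocol", PySem.Dict.mk [("priority", "high"), ("effort", "low")]),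
   ("segmentation", PySem.Dict.mk [("priority", "high"), ("effort", "high")]),
   ("monitoring", PySem.Dict.mk [("priority", "medium"), ("effort", "low")]),
   ("subnet", PySem.Dict.mk [("priority", "medium"), ("effort", "medium")])]

-- priority_info.update(mapping): insert every (k, v) of mapping in order
def pvA_update (d : PySem.Dict String String) (m : PySem.Dict String String) : PySem.Dict String String :=
  m.items.foldl (fun acc kv => acc.insert kv.1 kv.2) d

-- the inner 'for key, mapping in priority_mapping.items(): if key in violation.lower(): update; break'
def pvA_innerLoop (v : String) (info : PySem.Dict String String) :
    List (String × PySem.Dict String String) → PySem.Dict String String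
  | [] => info
  | (key, mapping) :: rest =>
    if PySem.Str.isIn key (PySem.Str.lower v) then pvA_update info mapping
    else pvA_innerLoop v info rest

def pvA_classify (v : String) : PySem.Dict String String :=
  pvA_innerLoop v (PySem.Dict.mk [("violation", v), ("priority", "low"), ("effort", "unknown")])
    pvA_priorityMapping

def pvA_priorityOrder : PySem.Dict String Int :=
  PySem.Dict.mk [("critical", 0), ("high", 1), ("medium", 2), ("low", 3)]

-- Python's x["priority"] always succeeds here (every dict built above carries the key);
-- ported as getD with an irrelevant default so the port stays total.
def pvA_key (x : PySem.Dict String String) : Int :=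
  pvA_priorityOrder.getD (x.getD "priority" "") 4

def prioritize_remediation_py (violations : List String) : List (List (String × String)) :=
  let prioritized := violations.foldl (fun acc v => acc ++ [pvA_classify v]) []
  (PySem.List.sorted prioritized pvA_key false).map PySem.Dict.items

-- ===== PORT B =====
def pvB_rules : List (String × String × String) :=
  [("encryption", "critical", "medium"),
   ("protocol", "high", "low"),
   ("segmentation", "high", "high"),
   ("monitoring", "medium", "low"),
   ("subnet", "medium", "medium")]

def pvB_classifyLoop (v : String) (lv : String) :
    List (String × String × String) → List (String × String)
  | [] => [("violation", v), ("priority", "low"), ("effort", "unknown")]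
  | (key, pri, eff) :: rest =>
    if PySem.Str.isIn key lv then [("violation", v), ("priority", pri), ("effort", eff)]
    else pvB_classifyLoop v lv rest

def pvB_classify (v : String) : List (String × String) :=
  pvB_classifyLoop v (PySem.Str.lower v) pvB_rules

-- d["priority"] on a dict that always carries the key
def pvB_priority (d : List (String × String)) : String :=
  (PySem.Dict.mk d).getD "priority" ""

def prioritize_remediation_py_alt (violations : List String) : List (List (String × String)) :=
  let classified := violations.map pvB_classify
  ["critical", "high", "medium", "low"].foldl
    (fun out level => out ++ classified.filter (fun d => pvB_priority d == level)) []

-- ===== PRECONDITION & SPEC =====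
def Spec_prioritize_remediation_py (violations : List String) (out : List (List (String × String))) : Prop := out = prioritize_remediation_py_alt violations
instance (violations : List String) (out : List (List (String × String))) : Decidable (Spec_prioritize_remediation_py violations out) := by unfold Spec_prioritize_remediation_py; infer_instance

-- ===== CLAIM (what is proved, stated in full; the proofs are below) =====
def Claim_equal_prioritize_remediation_py : Prop := ∀ (violations : List String), Dom_prioritize_remediation_py violations → Spec_prioritize_remediation_py violations (prioritize_remediation_py violations)

-- ===== LEMMAS AND PROOFS =====

-- A's classification produces (as .items) exactly B's classification
theorem classify_eq (v : String) : (pvA_classify v).items = pvB_classify v := by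
  simp only [pvA_classify, pvA_priorityMapping, pvB_classify, pvB_rules,
    pvA_innerLoop, pvB_classifyLoop, pvA_update]
  split_ifs <;> rfl

theorem classify_mk (v : String) : pvA_classify v = PySem.Dict.mk (pvB_classify v) := by
  rw [← classify_eq v]

-- the (priority string, sort key) of every classified entry is one of four pairs
theorem classify_pk (v : String) :
    (pvB_priority (pvB_classify v), pvA_key (PySem.Dict.mk (pvB_classify v))) ∈
      ([("critical", (0 : Int)), ("high", 1), ("medium", 2), ("low", 3)] : List (String × Int)) := by
  simp only [pvB_classify, pvB_rules, pvB_classifyLoop]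
  split_ifs <;> simp [pvB_priority, pvA_key, pvA_priorityOrder, PySem.Dict.getD, PySem.Dict.get?]

-- the sort-key test is the priority-string test, for the four (level, rank) pairs
theorem key_priority (v : String) (i : Int) (lvl : String)
    (hil : (lvl, i) ∈ ([("critical", (0 : Int)), ("high", 1), ("medium", 2), ("low", 3)] : List (String × Int))) :
    (pvA_key (PySem.Dict.mk (pvB_classify v)) == i) = (pvB_priority (pvB_classify v) == lvl) := by
  have h := classify_pk v
  simp only [List.mem_cons, List.not_mem_nil, or_false, Prod.mk.injEq] at h hil
  rcases h with ⟨hp, hk⟩ | ⟨hp, hk⟩ | ⟨hp, hk⟩ | ⟨hp, hk⟩ <;>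
    rcases hil with ⟨hl, hi⟩ | ⟨hl, hi⟩ | ⟨hl, hi⟩ | ⟨hl, hi⟩ <;>
    rw [hp, hk, hl, hi] <;> rfl

theorem insertBy_append_left {α : Type} (before : α → α → Bool) (z : α) (l1 l2 : List α)
    (h : ∀ y ∈ l1, before z y = false) :
    PySem.List.insertBy before z (l1 ++ l2) = l1 ++ PySem.List.insertBy before z l2 := by
  induction l1 with
  | nil => rfl
  | cons y ys ih =>
    simp only [List.cons_append, PySem.List.insertBy, h y (by simp), Bool.false_eq_true,
      if_false, List.cons.injEq, true_and]
    exact ih (fun y hy => h y (by simp [hy]))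

theorem insertBy_all_lt {α : Type} (before : α → α → Bool) (z : α) (l : List α)
    (h : ∀ y ∈ l, before z y = true) :
    PySem.List.insertBy before z l = z :: l := by
  cases l with
  | nil => rfl
  | cons y ys => simp [PySem.List.insertBy, h y (by simp)]

theorem insertBy_all_ge {α : Type} (before : α → α → Bool) (z : α) (l : List α)
    (h : ∀ y ∈ l, before z y = false) :
    PySem.List.insertBy before z l = l ++ [z] := by
  induction l with
  | nil => rfl
  | cons y ys ih =>
    simp only [PySem.List.insertBy, h y (by simp), Bool.false_eq_true, if_false,
      List.cons_append, List.cons.injEq, true_and]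
    exact ih (fun y hy => h y (by simp [hy]))

-- insertBy commutes with map of an (injective-enough) constructor
theorem insertBy_map {α β : Type} (before : β → β → Bool) (f : α → β) (x : α) (l : List α) :
    PySem.List.insertBy before (f x) (l.map f) =
      (PySem.List.insertBy (fun a b => before (f a) (f b)) x l).map f := by
  induction l with
  | nil => rfl
  | cons y ys ih =>
    simp only [List.map_cons, PySem.List.insertBy]
    split_ifs <;> simp [ih]

theorem sorted_map {α β κ : Type} [LinearOrder κ] (f : α → β) (key : β → κ) (xs : List α) :
    PySem.List.sorted (xs.map f) key false =
      (PySem.List.sorted xs (fun a => key (f a)) false).map f := by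
  rw [PySem.List.sorted_eq_foldl_insertBy, PySem.List.sorted_eq_foldl_insertBy, List.foldl_map]
  suffices h : ∀ (acc : List α),
      xs.foldl (fun acc x => PySem.List.insertBy (fun a b => decide (key a < key b)) (f x) acc) (acc.map f) =
      (xs.foldl (fun acc x => PySem.List.insertBy (fun a b => decide (key (f a) < key (f b))) x acc) acc).map f by
    exact h []
  induction xs with
  | nil => intro acc; rfl
  | cons x xs ih =>
    intro acc
    simp only [List.foldl_cons, insertBy_map]
    exact ih _

-- stable sort of a list whose keys lie in {0,1,2,3} is the concatenation of its four buckets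
theorem sorted_buckets {α : Type} (key : α → Int) (xs : List α)
    (h : ∀ x ∈ xs, key x = 0 ∨ key x = 1 ∨ key x = 2 ∨ key x = 3) :
    PySem.List.sorted xs key false =
      xs.filter (fun x => key x == 0) ++ (xs.filter (fun x => key x == 1) ++
      (xs.filter (fun x => key x == 2) ++ xs.filter (fun x => key x == 3))) := by
  rw [PySem.List.sorted_eq_foldl_insertBy]
  induction xs using List.reverseRecOn with
  | nil => rfl
  | append_singleton xs z ih =>
    rw [List.foldl_append, List.foldl_cons, List.foldl_nil,
      ih (fun x hx => h x (by simp [hx]))]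
    have hb : ∀ (i : Int) (x : α), x ∈ xs.filter (fun x => key x == i) → key x = i := by
      intro i x hx
      simpa using List.of_mem_filter hx
    simp only [List.filter_append, List.filter_cons, List.filter_nil]
    rcases h z (by simp) with hz | hz | hz | hz <;> simp only [hz] <;> norm_num
    · rw [insertBy_append_left _ z _ _ (fun y hy => by simp [hz, hb 0 y hy]),
        insertBy_all_lt _ z _ (fun y hy => by
          rcases List.mem_append.mp hy with h1 | h1
          · simp [hz, hb 1 y h1]
          · rcases List.mem_append.mp h1 with h2 | h2
            · simp [hz, hb 2 y h2]
            · simp [hz, hb 3 y h2])]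
    · rw [insertBy_append_left _ z _ _ (fun y hy => by simp [hz, hb 0 y hy]),
        insertBy_append_left _ z _ _ (fun y hy => by simp [hz, hb 1 y hy]),
        insertBy_all_lt _ z _ (fun y hy => by
          rcases List.mem_append.mp hy with h1 | h1
          · simp [hz, hb 2 y h1]
          · simp [hz, hb 3 y h1])]
    · rw [insertBy_append_left _ z _ _ (fun y hy => by simp [hz, hb 0 y hy]),
        insertBy_append_left _ z _ _ (fun y hy => by simp [hz, hb 1 y hy]),
        insertBy_append_left _ z _ _ (fun y hy => by simp [hz, hb 2 y hy]),
        insertBy_all_lt _ z _ (fun y hy => by simp [hz, hb 3 y hy])]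
    · rw [insertBy_append_left _ z _ _ (fun y hy => by simp [hz, hb 0 y hy]),
        insertBy_append_left _ z _ _ (fun y hy => by simp [hz, hb 1 y hy]),
        insertBy_append_left _ z _ _ (fun y hy => by simp [hz, hb 2 y hy]),
        insertBy_all_ge _ z _ (fun y hy => by simp [hz, hb 3 y hy])]

-- ===== VERDICT (by name: the statement is the Claim_ definition above) =====
theorem prioritize_remediation_py_spec : Claim_equal_prioritize_remediation_py := by
  intro violations _
  unfold Spec_prioritize_remediation_py prioritize_remediation_py prioritize_remediation_py_alt
  dsimp only
  rw [PySem.List.foldl_append_singleton_eq_map, List.nil_append]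
  have hmap : violations.map pvA_classify = (violations.map pvB_classify).map PySem.Dict.mk := by
    rw [List.map_map]
    exact List.map_congr_left (fun v _ => classify_mk v)
  rw [hmap, sorted_map, List.map_map]
  have hitems : (PySem.Dict.items ∘ PySem.Dict.mk (κ := String) (ν := String)) = id := rfl
  rw [hitems, List.map_id]
  rw [sorted_buckets _ _ (fun x hx => by
    obtain ⟨v, hv, rfl⟩ := List.mem_map.mp hx
    have h := classify_pk v
    simp only [List.mem_cons, List.not_mem_nil, or_false, Prod.mk.injEq] at h
    rcases h with ⟨_, hk⟩ | ⟨_, hk⟩ | ⟨_, hk⟩ | ⟨_, hk⟩ <;> simp [hk])]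
  simp only [List.foldl_cons, List.foldl_nil, List.nil_append, List.append_assoc]
  have hf : ∀ (i : Int) (lvl : String),
      (lvl, i) ∈ ([("critical", (0 : Int)), ("high", 1), ("medium", 2), ("low", 3)] : List (String × Int)) →
      (violations.map pvB_classify).filter (fun x => pvA_key (PySem.Dict.mk x) == i) =
      (violations.map pvB_classify).filter (fun d => pvB_priority d == lvl) := by
    intro i lvl hil
    exact List.filter_congr (fun x hx => by
      obtain ⟨v, hv, rfl⟩ := List.mem_map.mp hx
      exact key_priority v i lvl hil)
  rw [hf 0 "critical" (by simp), hf 1 "high" (by simp), hf 2 "medium" (by simp),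
    hf 3 "low" (by simp)]
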